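-- pv_equiv track=rewrite | github.com/cyrilgabriele/ParrotLLM | src/data/preprocess.py | heuristic_quality_filter_batch
-- ===== SOURCE A (Python) =====
-- MIN_WORD_COUNT = 50
--
-- MIN_CHAR_COUNT = 200
--
-- MAX_WORD_LENGTH = 40
--
-- NGRAM_SIZE = 10
--
-- NGRAM_MAX_REPEATS = 3
--
-- def _max_ngram_repeats_from_words(words: list[str], n: int = NGRAM_SIZE) -> int:
--     """Maximum repetition count of any word-level *n*-gram (accepts pre-split word list)."""
--     if len(words) < n:
--         return 0
--     counts: dict[tuple[str, ...], int] = {}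
--     for i in range(len(words) - n + 1):
--         gram = tuple(words[i : i + n])
--         counts[gram] = counts.get(gram, 0) + 1
--     return max(counts.values()) if counts else 0
--
-- def heuristic_quality_filter_batch(texts: list[str]) -> dict[str, list]:
--     """Phase 4 heuristic: flag low-quality / incoherent documents.
--
--     Returns {"quality_filter_status": ["kept"|"too_few_words"|"too_few_chars"|
--                                         "unnatural_word"|"ngram_repetition"]}
--     """
--     statuses: list[str] = []
--     for text in texts:
--         words = text.split()
--         if len(words) < MIN_WORD_COUNT:
--             statuses.append("too_few_words")
--         elif len(text) < MIN_CHAR_COUNT: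
--             statuses.append("too_few_chars")
--         elif max((len(w) for w in words), default=0) > MAX_WORD_LENGTH:
--             statuses.append("unnatural_word")
--         elif _max_ngram_repeats_from_words(words, NGRAM_SIZE) > NGRAM_MAX_REPEATS:
--             statuses.append("ngram_repetition")
--         else:
--             statuses.append("kept")
--     return {"quality_filter_status": statuses}
-- ===== SOURCE B (Python) =====
-- MIN_WORD_COUNT = 50
-- MIN_CHAR_COUNT = 200
-- MAX_WORD_LENGTH = 40
-- NGRAM_SIZE = 10
-- NGRAM_MAX_REPEATS = 3
--
-- def _longest_run(items):
--     """Longest run of equal adjacent elements (items pre-sorted, so = max multiplicity)."""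
--     best = 0
--     while items:
--         k = 1
--         while k < len(items) and items[k] == items[0]:
--             k += 1
--         best = max(best, k)
--         items = items[k:]
--     return best
--
-- def _classify(text):
--     words = text.split()
--     if len(words) < MIN_WORD_COUNT:
--         return "too_few_words"
--     if len(text) < MIN_CHAR_COUNT:
--         return "too_few_chars"
--     if any(len(w) > MAX_WORD_LENGTH for w in words):
--         return "unnatural_word"
--     grams = sorted(tuple(words[i:i + NGRAM_SIZE]) for i in range(len(words) - NGRAM_SIZE + 1))
--     if _longest_run(grams) > NGRAM_MAX_REPEATS:
--         return "ngram_repetition"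
--     return "kept"
--
-- def heuristic_quality_filter_batch(texts):
--     return {"quality_filter_status": [_classify(t) for t in texts]}
-- ===== Notes on version B (the rewrite author's own statement) =====
-- stated objective: alternative
-- what changed: The n-gram repetition count is computed by sorting the list of 10-grams and scanning once for the longest run of equal adjacent grams (= max multiplicity), instead of building a dict of counts and taking max of its values; the max-word-length test becomes an any() short-circuit and statuses are produced by a per-text classify function via a comprehension.
import Mathlib
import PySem

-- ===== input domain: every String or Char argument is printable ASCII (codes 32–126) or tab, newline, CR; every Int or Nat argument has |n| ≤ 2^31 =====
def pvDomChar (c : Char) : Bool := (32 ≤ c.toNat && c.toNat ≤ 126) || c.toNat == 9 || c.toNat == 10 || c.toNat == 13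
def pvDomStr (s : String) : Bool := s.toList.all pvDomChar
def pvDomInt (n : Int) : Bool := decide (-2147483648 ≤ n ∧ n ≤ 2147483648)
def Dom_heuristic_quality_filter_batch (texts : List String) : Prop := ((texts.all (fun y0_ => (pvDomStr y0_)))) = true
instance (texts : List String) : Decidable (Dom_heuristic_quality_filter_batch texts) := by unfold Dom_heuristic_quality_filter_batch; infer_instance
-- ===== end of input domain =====

-- B replaces A's dict-of-counts n-gram test by sort-the-grams + longest-equal-run scan (alternative algorithm, similar cost).

-- ===== PORT A =====
-- port of _max_ngram_repeats_from_words
def pyMaxNgramRepeats (words : List String) (n : Int) : Int :=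
  if (words.length : Int) < n then 0
  else
    let counts : PySem.Dict (List String) Int :=
      (PySem.List.pyRange 0 ((words.length : Int) - n + 1) 1).foldl
        (fun d i => d.insert (PySem.List.slice words (some i) (some (i + n)))
          (d.getD (PySem.List.slice words (some i) (some (i + n))) 0 + 1))
        PySem.Dict.empty
    if counts.items = [] then 0
    else (PySem.List.max? counts.values (fun x => x)).getD 0

def heuristic_quality_filter_batch (texts : List String) : List (String × List String) :=
  let statuses := texts.foldl (fun acc text =>
    let words := PySem.Str.split₀ text
    acc ++ [if words.length < 50 then "too_few_words"
       else if PySem.Str.len text < 200 then "too_few_chars"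
       else if (PySem.List.maxD (words.map (fun w => PySem.Str.len w)) (fun x => x) 0) > 40 then "unnatural_word"
       else if pyMaxNgramRepeats words 10 > 3 then "ngram_repetition"
       else "kept"]) []
  [("quality_filter_status", statuses)]

-- ===== PORT B =====
-- port of _longest_run (while loop → structural recursion on the remaining suffix)
def longestRun (items : List (List String)) : Nat :=
  match items with
  | [] => 0
  | a :: t =>
      max ((t.takeWhile (fun g => g == a)).length + 1)
          (longestRun (t.dropWhile (fun g => g == a)))
termination_by items.length
decreasing_by
  exact Nat.lt_succ_of_le (List.length_dropWhile_le _ _)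

-- port of _classify
def pyClassify (text : String) : String :=
  let words := PySem.Str.split₀ text
  if words.length < 50 then "too_few_words"
  else if PySem.Str.len text < 200 then "too_few_chars"
  else if words.any (fun w => PySem.Str.len w > 40) then "unnatural_word"
  else
    let grams := PySem.List.sorted
      ((PySem.List.pyRange 0 ((words.length : Int) - 10 + 1) 1).map
        (fun i => PySem.List.slice words (some i) (some (i + 10)))) (fun g => g) false
    if longestRun grams > 3 then "ngram_repetition" else "kept"

def heuristic_quality_filter_batch_alt (texts : List String) : List (String × List String) :=
  [("quality_filter_status", texts.map pyClassify)]

-- ===== PRECONDITION & SPEC =====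
def Spec_heuristic_quality_filter_batch (texts : List String) (out : List (String × List String)) : Prop := out = heuristic_quality_filter_batch_alt texts
instance (texts : List String) (out : List (String × List String)) : Decidable (Spec_heuristic_quality_filter_batch texts out) := by unfold Spec_heuristic_quality_filter_batch; infer_instance

-- ===== CLAIM (what is proved, stated in full; the proofs are below) =====
def Claim_equal_heuristic_quality_filter_batch : Prop := ∀ (texts : List String), Dom_heuristic_quality_filter_batch texts → Spec_heuristic_quality_filter_batch texts (heuristic_quality_filter_batch texts)

-- ===== LEMMAS AND PROOFS =====

-- default-0 running max of lengths exceeds 40 iff some length does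
theorem maxD_gt_iff (xs : List Int) :
    (PySem.List.maxD xs (fun x => x) 0 > 40) ↔ xs.any (fun x => decide (x > 40)) := by
  cases hx : PySem.List.max? xs (fun x => x) with
  | none =>
    have hnil : xs = [] := (PySem.List.max?_eq_none_iff _ _).mp hx
    subst hnil
    simp [PySem.List.maxD, hx]
  | some m =>
    have hmem : m ∈ xs := PySem.List.max?_mem hx
    have hmax : ∀ y ∈ xs, y ≤ m := PySem.List.max?_isMax hx
    simp only [PySem.List.maxD, hx, Option.getD_some, List.any_eq_true, decide_eq_true_eq]
    constructor
    · exact fun h => ⟨m, hmem, h⟩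
    · rintro ⟨x, hxm, hx40⟩
      exact lt_of_lt_of_le hx40 (hmax x hxm)

theorem longestRun_nil : longestRun [] = 0 := by rw [longestRun]

-- the two (propositionally equal) instance paths for sorting List String
theorem sorted_inst_eq (L : List (List String)) :
    (@PySem.List.sorted (List String) (List String) List.instLT (fun a b => a.decidableLT b) L (fun g => g) false) =
    (@PySem.List.sorted (List String) (List String) List.instLinearOrder.toLT LinearOrder.toDecidableLT L (fun g => g) false) := by
  congr 1

theorem longestRun_cons (a : List String) (t : List (List String)) :
    longestRun (a :: t) = max ((t.takeWhile (fun g => g == a)).length + 1)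
          (longestRun (t.dropWhile (fun g => g == a))) := by rw [longestRun]

-- facts about the leading block of a ≤-sorted list a :: t
theorem run_step (a : List String) (t : List (List String)) (hs : (a :: t).Pairwise (· ≤ ·)) :
    (t.dropWhile (fun g => g == a)).Pairwise (· ≤ ·) ∧
    a ∉ t.dropWhile (fun g => g == a) ∧
    (a :: t).count a = (t.takeWhile (fun g => g == a)).length + 1 ∧
    (∀ x : List String, x ≠ a → (a :: t).count x = (t.dropWhile (fun g => g == a)).count x) := by
  have hall : ∀ g ∈ t.takeWhile (fun g => g == a), g = a :=
    fun g hg => eq_of_beq (List.mem_takeWhile_imp (p := fun g => g == a) hg)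
  have hpw : (t.dropWhile (fun g => g == a)).Pairwise (· ≤ ·) :=
    hs.sublist ((List.dropWhile_sublist _).trans (List.sublist_cons_self a t))
  have htba : t.takeWhile (fun g => g == a) ++ t.dropWhile (fun g => g == a) = t :=
    List.takeWhile_append_dropWhile
  have hna : a ∉ t.dropWhile (fun g => g == a) := by
    intro hmem
    cases hd : t.dropWhile (fun g => g == a) with
    | nil => rw [hd] at hmem; simp at hmem
    | cons b r =>
      rw [hd] at hmem
      have hne : t.dropWhile (fun g => g == a) ≠ [] := by rw [hd]; simp
      have hpb := List.head_dropWhile_not (fun g => g == a) hne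
      have hb2 : (List.dropWhile (fun g => g == a) t).head hne = b := by
        have h2 := congrArg List.head? hd
        rw [List.head?_eq_some_head hne] at h2
        simpa using h2
      have hba : b ≠ a := by
        intro hba
        rw [hb2, hba] at hpb
        simp at hpb
      have hat : ∀ x ∈ t, a ≤ x := (List.pairwise_cons.mp hs).1
      have hbt : b ∈ t := (List.dropWhile_sublist _).subset (hd ▸ List.mem_cons_self)
      have hab : a ≤ b := hat b hbt
      rcases List.mem_cons.mp hmem with h | h
      · exact hba h.symm
      · have hrpw : (b :: r).Pairwise (· ≤ ·) := hd ▸ hpw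
        have hba' : b ≤ a := (List.pairwise_cons.mp hrpw).1 a h
        exact hba (le_antisymm hba' hab)
  refine ⟨hpw, hna, ?_, ?_⟩
  · have hb : List.count a (t.takeWhile (fun g => g == a)) = (t.takeWhile (fun g => g == a)).length :=
      List.count_eq_length.mpr (fun b hb => (hall b hb).symm)
    have hr : List.count a (t.dropWhile (fun g => g == a)) = 0 := List.count_eq_zero.mpr hna
    have hct : List.count a t = (t.takeWhile (fun g => g == a)).length := by
      conv_lhs => rw [← htba]
      rw [List.count_append, hb, hr]
      omega
    rw [List.count_cons_self, hct]
  · intro x hxa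
    have hxblk : x ∉ t.takeWhile (fun g => g == a) := fun h => hxa (hall x h)
    have h1 : (a :: t).count x = t.count x := by
      simp [List.count_cons]
      exact fun h => hxa h.symm
    rw [h1]
    conv_lhs => rw [← htba]
    rw [List.count_append, List.count_eq_zero.mpr hxblk]
    omega

-- count of any element of a ≤-sorted list is bounded by its longest run
theorem count_le_longestRun (s : List (List String)) :
    s.Pairwise (· ≤ ·) → ∀ x ∈ s, s.count x ≤ longestRun s := by
  induction s using longestRun.induct with
  | case1 => intro _ x hx; simp at hx
  | case2 a t ih =>
    intro hs x hx
    obtain ⟨hpw, hna, hca, hcx⟩ := run_step a t hs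
    rw [longestRun_cons]
    by_cases hxa : x = a
    · subst hxa
      rw [hca]
      exact le_max_left _ _
    · have hxt : x ∈ t := by
        rcases List.mem_cons.mp hx with h | h
        · exact absurd h hxa
        · exact h
      have hxblk : x ∉ t.takeWhile (fun g => g == a) := by
        intro h
        exact hxa (eq_of_beq (List.mem_takeWhile_imp (p := fun g => g == a) h))
      have hxrest : x ∈ t.dropWhile (fun g => g == a) := by
        have hm : x ∈ t.takeWhile (fun g => g == a) ++ t.dropWhile (fun g => g == a) := by
          rw [List.takeWhile_append_dropWhile]
          exact hxt
        rcases List.mem_append.mp hm with h | h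
        · exact absurd h hxblk
        · exact h
      rw [hcx x hxa]
      exact le_trans (ih hpw x hxrest) (le_max_right _ _)

-- the longest run of a nonempty ≤-sorted list is attained as a count
theorem longestRun_attained (s : List (List String)) :
    s.Pairwise (· ≤ ·) → s ≠ [] → ∃ x ∈ s, s.count x = longestRun s := by
  induction s using longestRun.induct with
  | case1 => intro _ h; exact absurd rfl h
  | case2 a t ih =>
    intro hs _
    obtain ⟨hpw, hna, hca, hcx⟩ := run_step a t hs
    rw [longestRun_cons]
    by_cases hle : longestRun (t.dropWhile (fun g => g == a)) ≤ (t.takeWhile (fun g => g == a)).length + 1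
    · exact ⟨a, List.mem_cons_self, by rw [hca, Nat.max_eq_left hle]⟩
    · rw [Nat.not_le] at hle
      have hrne : t.dropWhile (fun g => g == a) ≠ [] := by
        intro h
        rw [h, longestRun_nil] at hle
        omega
      obtain ⟨x, hxr, hxc⟩ := ih hpw hrne
      have hxa : x ≠ a := fun h => hna (h ▸ hxr)
      refine ⟨x, List.mem_cons_of_mem a ((List.dropWhile_sublist _).subset hxr), ?_⟩
      rw [hcx x hxa, hxc, Nat.max_eq_right (le_of_lt hle)]

-- A's ngram value equals B's longest-run-of-sorted value
theorem ngram_eq (words : List String) (h : 10 ≤ words.length) :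
    pyMaxNgramRepeats words 10 =
      (longestRun (PySem.List.sorted
        ((PySem.List.pyRange 0 ((words.length : Int) - 10 + 1) 1).map
          (fun i => PySem.List.slice words (some i) (some (i + 10)))) (fun g => g) false) : Int) := by
  have hn : ¬ ((words.length : Int) < 10) := by omega
  unfold pyMaxNgramRepeats
  rw [if_neg hn]
  have hfold : (PySem.List.pyRange 0 ((words.length : Int) - 10 + 1) 1).foldl
      (fun d i => d.insert (PySem.List.slice words (some i) (some (i + 10)))
        (d.getD (PySem.List.slice words (some i) (some (i + 10))) 0 + 1)) PySem.Dict.empty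
      = PySem.Dict.counter ((PySem.List.pyRange 0 ((words.length : Int) - 10 + 1) 1).map
          (fun i => PySem.List.slice words (some i) (some (i + 10)))) := by
    rw [← List.foldl_map (f := fun i => PySem.List.slice words (some i) (some (i + 10)))
        (g := fun (d : PySem.Dict (List String) Int) x => d.insert x (d.getD x 0 + 1))]
    exact PySem.Dict.foldl_insert_getD_add_one_eq_counter _
  simp only [hfold]
  set L := (PySem.List.pyRange 0 ((words.length : Int) - 10 + 1) 1).map
      (fun i => PySem.List.slice words (some i) (some (i + 10))) with hLdef
  have h0mem : (0 : Int) ∈ PySem.List.pyRange 0 ((words.length : Int) - 10 + 1) 1 := by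
    rw [PySem.List.mem_pyRange_one]
    constructor
    · omega
    · omega
  have hf0 : PySem.List.slice words (some 0) (some (0 + 10)) ∈ L :=
    List.mem_map_of_mem h0mem
  have hLne : L ≠ [] := List.ne_nil_of_mem hf0
  have hitems := PySem.Dict.items_counter L
  have hofne : PySem.Set.ofList L ≠ [] :=
    List.ne_nil_of_mem ((PySem.Set.mem_ofList _ _).mpr hf0)
  have hitems_ne : ¬ ((PySem.Dict.counter L).items = []) := by
    rw [hitems]
    intro hnil
    exact hofne (List.map_eq_nil_iff.mp hnil)
  rw [if_neg hitems_ne]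
  have hvals : (PySem.Dict.counter L).values = (PySem.Set.ofList L).map (fun k => (List.count k L : Int)) := by
    show (PySem.Dict.counter L).items.map Prod.snd = _
    rw [hitems, List.map_map]
    rfl
  rw [hvals]
  set s := PySem.List.sorted L (fun g => g) false with hsdef
  have hperm : s.Perm L := PySem.List.sorted_perm L (fun g => g) false
  have hpw : s.Pairwise (· ≤ ·) := by
    rw [hsdef, sorted_inst_eq]
    simpa using PySem.List.sorted_pairwise L (fun g => g)
  have hub : ∀ x ∈ L, List.count x L ≤ longestRun s := by
    intro x hx
    rw [← hperm.count_eq]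
    exact count_le_longestRun s hpw x (hperm.mem_iff.mpr hx)
  have hsne : s ≠ [] := by
    rw [hsdef]
    exact fun hnil => hLne ((PySem.List.sorted_eq_nil_iff _ _ _).mp hnil)
  obtain ⟨x0, hx0s, hx0c⟩ := longestRun_attained s hpw hsne
  have hx0L : x0 ∈ L := hperm.mem_iff.mp hx0s
  have hx0cL : List.count x0 L = longestRun s := by
    rw [← hperm.count_eq]
    exact hx0c
  cases hmx : PySem.List.max? ((PySem.Set.ofList L).map (fun k => (List.count k L : Int))) (fun x => x) with
  | none =>
    exfalso
    have := (PySem.List.max?_eq_none_iff _ _).mp hmx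
    exact hofne (List.map_eq_nil_iff.mp this)
  | some m =>
    simp only [Option.getD_some]
    have hmem := PySem.List.max?_mem hmx
    have hmax := PySem.List.max?_isMax hmx
    obtain ⟨k, hk, hkm⟩ := List.mem_map.mp hmem
    have hkL : k ∈ L := (PySem.Set.mem_ofList _ _).mp hk
    have h1 : m ≤ (longestRun s : Int) := by
      rw [← hkm]
      exact_mod_cast hub k hkL
    have h2 : (longestRun s : Int) ≤ m := by
      have hmemR : ((List.count x0 L : Int)) ∈ (PySem.Set.ofList L).map (fun k => (List.count k L : Int)) :=
        List.mem_map.mpr ⟨x0, (PySem.Set.mem_ofList _ _).mpr hx0L, rfl⟩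
      have hle := hmax _ hmemR
      calc (longestRun s : Int) = (List.count x0 L : Int) := by exact_mod_cast congrArg Nat.cast hx0cL.symm
        _ ≤ m := hle
    exact le_antisymm h1 h2

theorem perText_eq (text : String) : 
    (let words := PySem.Str.split₀ text
     if words.length < 50 then "too_few_words"
     else if PySem.Str.len text < 200 then "too_few_chars"
     else if (PySem.List.maxD (words.map (fun w => PySem.Str.len w)) (fun x => x) 0) > 40 then "unnatural_word"
     else if pyMaxNgramRepeats words 10 > 3 then "ngram_repetition"
     else "kept") = pyClassify text := by
  simp only [pyClassify]
  by_cases h1 : (PySem.Str.split₀ text).length < 50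
  · simp only [if_pos h1]
  · simp only [if_neg h1]
    by_cases h2 : PySem.Str.len text < 200
    · simp only [if_pos h2]
    · simp only [if_neg h2]
      have hm : ((PySem.List.maxD ((PySem.Str.split₀ text).map (fun w => PySem.Str.len w)) (fun x => x) 0) > 40) ↔
          ((PySem.Str.split₀ text).any (fun w => decide (PySem.Str.len w > 40)) = true) := by
        rw [maxD_gt_iff, List.any_map]
        simp [Function.comp]
      rw [if_congr hm rfl rfl]
      by_cases h3 : (PySem.Str.split₀ text).any (fun w => decide (PySem.Str.len w > 40)) = true
      · simp only [if_pos h3]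
      · simp only [if_neg h3]
        have hlen : 10 ≤ (PySem.Str.split₀ text).length := by omega
        have hng : (pyMaxNgramRepeats (PySem.Str.split₀ text) 10 > 3) ↔
            (longestRun (PySem.List.sorted
              ((PySem.List.pyRange 0 (((PySem.Str.split₀ text).length : Int) - 10 + 1) 1).map
                (fun i => PySem.List.slice (PySem.Str.split₀ text) (some i) (some (i + 10)))) (fun g => g) false) > 3) := by
          rw [ngram_eq _ hlen]
          exact ⟨fun h => by exact_mod_cast h, fun h => by exact_mod_cast h⟩
        rw [if_congr hng rfl rfl]

-- ===== VERDICT (by name: the statement is the Claim_ definition above) =====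
theorem heuristic_quality_filter_batch_spec : Claim_equal_heuristic_quality_filter_batch := by
  intro texts _
  unfold Spec_heuristic_quality_filter_batch heuristic_quality_filter_batch heuristic_quality_filter_batch_alt
  rw [PySem.List.foldl_append_singleton_eq_map]
  simp only [List.nil_append]
  have h : ∀ t ∈ texts, (fun text =>
      (let words := PySem.Str.split₀ text
       if words.length < 50 then "too_few_words"
       else if PySem.Str.len text < 200 then "too_few_chars"
       else if (PySem.List.maxD (words.map (fun w => PySem.Str.len w)) (fun x => x) 0) > 40 then "unnatural_word"
       else if pyMaxNgramRepeats words 10 > 3 then "ngram_repetition"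
       else "kept")) t = pyClassify t := fun t _ => perText_eq t
  rw [List.map_congr_left h]
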